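-- pv_equiv track=rewrite | github.com/MarceloJanio/Disk-Scheduling-Algorithms | ram.py | verificadistante
-- ===== SOURCE A (Python) =====
-- def verificadistante(lista, listaConfere):
--     index = 0
--     listatemp = lista.copy()
--     while(len(listatemp)>1 and index <= len(listaConfere)):
--         try:
--             listatemp.remove(listaConfere[index])
--         except:
--             pass
--         index+=1
--     return listatemp[0]
-- ===== SOURCE B (Python) =====
-- def verificadistante(lista, listaConfere):
--     count = {}
--     for v in lista:
--         count[v] = count.get(v, 0) + 1
--     removed = {}
--     remaining = len(lista)
--     for c in listaConfere:
--         if remaining == 1: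
--             break
--         if removed.get(c, 0) < count.get(c, 0):
--             removed[c] = removed.get(c, 0) + 1
--             remaining -= 1
--     seen = {}
--     for v in lista:
--         if seen.get(v, 0) >= removed.get(v, 0):
--             return v
--         seen[v] = seen.get(v, 0) + 1
-- ===== Notes on version B (the rewrite author's own statement) =====
-- stated objective: faster
-- what changed: Replaces the repeated list.remove scans (O(n*m)) with hash-map counting: one pass builds per-value counts, one pass over listaConfere tallies how many occurrences of each value get removed (stopping when one element would remain), and one pass over lista returns the first element whose occurrence rank survives.
import Mathlib
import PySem

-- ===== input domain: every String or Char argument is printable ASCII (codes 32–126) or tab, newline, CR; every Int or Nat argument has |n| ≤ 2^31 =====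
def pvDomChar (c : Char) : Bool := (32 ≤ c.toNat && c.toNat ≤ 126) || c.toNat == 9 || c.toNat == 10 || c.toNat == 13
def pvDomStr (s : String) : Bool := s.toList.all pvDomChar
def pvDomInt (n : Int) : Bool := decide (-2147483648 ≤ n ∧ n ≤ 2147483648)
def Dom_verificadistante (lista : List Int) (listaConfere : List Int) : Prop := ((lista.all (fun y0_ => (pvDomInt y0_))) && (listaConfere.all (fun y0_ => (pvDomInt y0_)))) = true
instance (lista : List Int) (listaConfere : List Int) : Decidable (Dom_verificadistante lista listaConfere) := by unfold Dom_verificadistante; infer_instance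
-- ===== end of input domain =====

-- B replaces A's O(n*m) repeated list.remove scans by three hash-counting passes (O(n+m)); equivalence proved for nonempty lista (A raises IndexError on []).


-- ===== PORT A =====
-- the try: listatemp.remove(...) except: pass block
def removeTry (temp : List Int) (c : Int) : List Int := (PySem.List.remove? temp c).getD temp

-- the while loop: listatemp and index are the loop state
def verificaLoop (listaConfere : List Int) (temp : List Int) (index : Nat) : List Int :=
  if 1 < temp.length ∧ index ≤ listaConfere.length then
    let temp' :=
      match PySem.List.pyGet? listaConfere (index : Int) with
      | none => temp          -- IndexError from listaConfere[index], caught: pass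
      | some v => removeTry temp v
    verificaLoop listaConfere temp' (index + 1)
  else temp
termination_by listaConfere.length + 1 - index
decreasing_by omega

def verificadistante (lista : List Int) (listaConfere : List Int) : Int :=
  -- listatemp[0]; none = IndexError, excluded by Pre_ (lista ≠ [])
  (PySem.List.pyGet? (verificaLoop listaConfere lista 0) 0).getD 0

-- ===== PORT B =====
-- count = {}; for v in lista: count[v] = count.get(v, 0) + 1
def bCount (lista : List Int) : PySem.Dict Int Int :=
  lista.foldl (fun d v => d.modify v 0 (· + 1)) PySem.Dict.empty

-- for c in listaConfere: … (state: removed, remaining)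
def bRemove (count : PySem.Dict Int Int) : List Int → PySem.Dict Int Int → Int → PySem.Dict Int Int
  | [], removed, _ => removed
  | c :: rest, removed, remaining =>
    if remaining = 1 then removed
    else if removed.getD c 0 < count.getD c 0 then
      bRemove count rest (removed.modify c 0 (· + 1)) (remaining - 1)
    else bRemove count rest removed remaining

-- seen = {}; for v in lista: … (returns 0 where Python B falls off the end: lista = [], excluded by Pre_)
def bScan (removed : PySem.Dict Int Int) : List Int → PySem.Dict Int Int → Int
  | [], _ => 0
  | v :: t, seen =>
    if removed.getD v 0 ≤ seen.getD v 0 then v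
    else bScan removed t (seen.modify v 0 (· + 1))

def verificadistante_alt (lista : List Int) (listaConfere : List Int) : Int :=
  bScan (bRemove (bCount lista) listaConfere PySem.Dict.empty (lista.length : Int)) lista PySem.Dict.empty

-- ===== PRECONDITION & SPEC =====
-- Pre_ excludes only lista = [], on which A raises IndexError at listatemp[0].
def Pre_verificadistante (lista : List Int) (listaConfere : List Int) : Prop := lista ≠ []
instance (lista : List Int) (listaConfere : List Int) : Decidable (Pre_verificadistante lista listaConfere) := by unfold Pre_verificadistante; infer_instance
def pvWitness_verificadistante : List Int × List Int := ([5, 2, 9], [2, 5])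

def Spec_verificadistante (lista : List Int) (listaConfere : List Int) (out : Int) : Prop := out = verificadistante_alt lista listaConfere
instance (lista : List Int) (listaConfere : List Int) (out : Int) : Decidable (Spec_verificadistante lista listaConfere out) := by unfold Spec_verificadistante; infer_instance

-- ===== CLAIM (what is proved, stated in full; the proofs are below) =====
def Claim_equal_verificadistante : Prop := ∀ (lista : List Int) (listaConfere : List Int), Dom_verificadistante lista listaConfere → Pre_verificadistante lista listaConfere → Spec_verificadistante lista listaConfere (verificadistante lista listaConfere)

-- ===== LEMMAS AND PROOFS =====

-- structural model of A's while loop (index replaced by the unprocessed suffix of listaConfere)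
def modelA : List Int → List Int → List Int
  | [], temp => temp
  | c :: rest, temp => if 1 < temp.length then modelA rest (removeTry temp c) else temp

-- functional removal model: scrub l d removes, for each value v, the first (d v) occurrences of v from l
def scrub : List Int → (Int → Nat) → List Int
  | [], _ => []
  | v :: t, d => if 0 < d v then scrub t (fun x => if x = v then d v - 1 else d x) else v :: scrub t d

def bumpF (d : Int → Nat) (c : Int) : Int → Nat := fun x => if x = c then d x + 1 else d x

def fOf (d : PySem.Dict Int Int) : Int → Nat := fun v => (d.getD v 0).toNat

-- functional model of bScan
def scanF (d : Int → Nat) : List Int → (Int → Nat) → Int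
  | [], _ => 0
  | v :: t, s => if d v ≤ s v then v else scanF d t (bumpF s v)

lemma verificaLoop_eq_modelA (listaConfere : List Int) : ∀ (temp : List Int) (i : Nat), i ≤ listaConfere.length →
    verificaLoop listaConfere temp i = modelA (listaConfere.drop i) temp := by
  intro temp i h
  induction temp, i using verificaLoop.induct listaConfere with
  | case1 temp i hcond temp' ih =>
    obtain ⟨h1, h2⟩ := hcond
    rw [verificaLoop, if_pos ⟨h1, h2⟩]
    by_cases hlt : i < listaConfere.length
    · have hg : PySem.List.pyGet? listaConfere (i : Int) = some listaConfere[i] := by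
        simp [List.getElem?_eq_getElem hlt]
      have ht : temp' = removeTry temp listaConfere[i] := by simp only [temp', hg]
      rw [ht] at ih
      show verificaLoop listaConfere temp' (i + 1) = _
      rw [ht, List.drop_eq_getElem_cons hlt, modelA, if_pos h1]
      exact ih (by omega)
    · -- i = length: the extra no-op iteration (IndexError caught by the except)
      have hi : i = listaConfere.length := by omega
      have hg : PySem.List.pyGet? listaConfere (i : Int) = none := by
        simp [hi]
      have ht : temp' = temp := by simp only [temp', hg]
      show verificaLoop listaConfere temp' (i + 1) = _
      rw [ht, verificaLoop, if_neg (by omega)]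
      simp [hi, modelA]
  | case2 temp i hcond =>
    rw [verificaLoop, if_neg hcond]
    cases hd : listaConfere.drop i with
    | nil => rfl
    | cons c rest => rw [modelA, if_neg (fun hl => hcond ⟨hl, h⟩)]

lemma scrub_congr : ∀ (l : List Int) (d1 d2 : Int → Nat), (∀ v, d1 v = d2 v) → scrub l d1 = scrub l d2 := by
  intro l d1 d2 h
  have : d1 = d2 := funext h
  rw [this]

lemma mem_scrub : ∀ (l : List Int) (d : Int → Nat) (c : Int), c ∈ scrub l d ↔ d c < l.count c := by
  intro l
  induction l with
  | nil => intro d c; simp [scrub]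
  | cons v t ih =>
    intro d c
    rw [scrub]
    by_cases hv : 0 < d v
    · simp only [hv, if_true, ih]
      by_cases hc : c = v
      · subst hc; simp [List.count_cons]; omega
      · simp [List.count_cons, hc, Ne.symm hc]
    · simp only [hv, if_false, List.mem_cons, ih]
      by_cases hc : c = v
      · subst hc; simp [List.count_cons]; omega
      · simp [List.count_cons, hc, Ne.symm hc]

lemma scrub_bump : ∀ (l : List Int) (d : Int → Nat) (c : Int),
    d c < l.count c → scrub l (bumpF d c) = (scrub l d).erase c := by
  intro l
  induction l with
  | nil => intro d c h; simp at h
  | cons v t ih =>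
    intro d c h
    by_cases hc : c = v
    · subst hc
      rw [scrub, scrub]
      have hbpos : 0 < bumpF d c c := by simp [bumpF]
      by_cases hv : 0 < d c
      · rw [if_pos hbpos, if_pos hv]
        have he : (fun x => if x = c then bumpF d c c - 1 else bumpF d c x)
            = bumpF (fun x => if x = c then d c - 1 else d x) c := by
          funext x
          by_cases hx : x = c
          · subst hx; simp [bumpF]; omega
          · simp [bumpF, hx]
        have harg : (fun x => if x = c then d c - 1 else d x) c < t.count c := by
          have hbeta : (fun x => if x = c then d c - 1 else d x) c = d c - 1 := by simp
          rw [hbeta]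
          simp at h
          omega
        rw [he, ih _ _ harg]
      · rw [if_pos hbpos, if_neg hv]
        have he : (fun x => if x = c then bumpF d c c - 1 else bumpF d c x) = d := by
          funext x
          by_cases hx : x = c
          · subst hx; simp [bumpF]
          · simp [bumpF, hx]
        rw [he, List.erase_cons_head]
    · rw [scrub, scrub]
      have hbv : bumpF d c v = d v := by simp [bumpF, Ne.symm hc]
      have hcount : d c < t.count c := by
        simpa [hc, Ne.symm hc] using h
      by_cases hv : 0 < d v
      · rw [if_pos (by rw [hbv]; exact hv), if_pos hv]
        have he : (fun x => if x = v then bumpF d c v - 1 else bumpF d c x)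
            = bumpF (fun x => if x = v then d v - 1 else d x) c := by
          funext x
          by_cases hx : x = v
          · subst hx; simp [bumpF, Ne.symm hc]
          · by_cases hxc : x = c <;> simp [bumpF, hx, hxc, hc]
        have harg : (fun x => if x = v then d v - 1 else d x) c < t.count c := by
          simpa [hc] using hcount
        rw [he, ih _ _ harg]
      · rw [if_neg (by rw [hbv]; exact hv), if_neg hv]
        rw [List.erase_cons_tail (by simp [Ne.symm hc]), ih _ _ hcount]

lemma scrub_zero : ∀ l : List Int, scrub l (fun _ => 0) = l := by
  intro l; induction l with
  | nil => rfl
  | cons v t ih => rw [scrub]; simp [ih]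

lemma scanF_eq_head : ∀ (l : List Int) (d s : Int → Nat),
    scanF d l s = (scrub l (fun x => d x - s x)).headD 0 := by
  intro l
  induction l with
  | nil => intro d s; rfl
  | cons v t ih =>
    intro d s
    rw [scanF, scrub]
    by_cases hv : d v ≤ s v
    · have : ¬ 0 < d v - s v := by omega
      simp [hv, this]
    · have h0 : 0 < d v - s v := by omega
      simp only [hv, if_false, h0, if_true]
      rw [ih d (bumpF s v)]
      congr 1
      apply scrub_congr
      intro x
      by_cases hx : x = v <;> simp [bumpF, hx] <;> omega

lemma fOf_modify (d : PySem.Dict Int Int) (c : Int) (hnn : ∀ v, 0 ≤ d.getD v 0) :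
    ∀ x, fOf (d.modify c 0 (· + 1)) x = bumpF (fOf d) c x := by
  intro x
  simp only [fOf, bumpF, PySem.Dict.getD_modify]
  by_cases hx : x = c
  · simp [hx]; have := hnn c; omega
  · simp [hx]

lemma modify_nonneg (d : PySem.Dict Int Int) (c : Int) (hnn : ∀ v, 0 ≤ d.getD v 0) :
    ∀ v, 0 ≤ (d.modify c 0 (· + 1)).getD v 0 := by
  intro v
  rw [PySem.Dict.getD_modify]
  by_cases hv : v = c
  · simp [hv]; have := hnn c; omega
  · simp [hv]; exact hnn v

lemma bCount_getD (lista : List Int) (c : Int) : (bCount lista).getD c 0 = (lista.count c : Int) := by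
  have : bCount lista = PySem.Dict.counter lista := (PySem.Dict.counter_eq_foldl lista).symm
  rw [this, PySem.Dict.getD_counter]

lemma bScan_eq_scanF (removed : PySem.Dict Int Int) (hr : ∀ v, 0 ≤ removed.getD v 0) :
    ∀ (l : List Int) (seen : PySem.Dict Int Int), (∀ v, 0 ≤ seen.getD v 0) →
    bScan removed l seen = scanF (fOf removed) l (fOf seen) := by
  intro l
  induction l with
  | nil => intro seen _; rfl
  | cons v t ih =>
    intro seen hs
    rw [bScan, scanF]
    by_cases hc : removed.getD v 0 ≤ seen.getD v 0
    · have : fOf removed v ≤ fOf seen v := by simp only [fOf]; omega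
      simp [hc, this]
    · have h2 : ¬ fOf removed v ≤ fOf seen v := by
        simp only [fOf]; have := hr v; have := hs v; omega
      simp only [hc, if_false, h2, if_false]
      rw [ih _ (modify_nonneg seen v hs)]
      congr 1
      exact funext (fOf_modify seen v hs)

lemma sim (lista : List Int) : ∀ (conf : List Int) (removed : PySem.Dict Int Int),
    (∀ v, 0 ≤ removed.getD v 0) → 1 ≤ (scrub lista (fOf removed)).length →
    modelA conf (scrub lista (fOf removed)) =
      scrub lista (fOf (bRemove (bCount lista) conf removed ((scrub lista (fOf removed)).length : Int))) := by
  intro conf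
  induction conf with
  | nil => intro removed _ _; rfl
  | cons c rest ih =>
    intro removed hnn hlen
    rw [modelA, bRemove]
    by_cases h1 : (((scrub lista (fOf removed)).length : Int)) = 1
    · have : ¬ 1 < (scrub lista (fOf removed)).length := by omega
      simp [this, h1]
    · have hgt : 1 < (scrub lista (fOf removed)).length := by omega
      simp only [hgt, if_true, h1, if_false]
      by_cases hrem : removed.getD c 0 < (bCount lista).getD c 0
      · -- element present: one removal happens on both sides
        have hcnt : fOf removed c < lista.count c := by
          rw [bCount_getD] at hrem; simp only [fOf]; have := hnn c; omega
        have hmem : c ∈ scrub lista (fOf removed) := (mem_scrub lista (fOf removed) c).mpr hcnt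
        have hrt : removeTry (scrub lista (fOf removed)) c = (scrub lista (fOf removed)).erase c := by
          simp [removeTry, PySem.List.remove?_eq_some_erase _ c hmem]
        have hscr : scrub lista (fOf (removed.modify c 0 (· + 1))) = (scrub lista (fOf removed)).erase c := by
          rw [scrub_congr lista _ _ (fOf_modify removed c hnn)]
          exact scrub_bump lista (fOf removed) c hcnt
        have hlene : ((scrub lista (fOf removed)).erase c).length = (scrub lista (fOf removed)).length - 1 :=
          List.length_erase_of_mem hmem
        have hcast : ((scrub lista (fOf removed)).length : Int) - 1
            = ((scrub lista (fOf (removed.modify c 0 (· + 1)))).length : Int) := by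
          rw [hscr, hlene]; omega
        simp only [hrem, if_true]
        rw [hrt, ← hscr, hcast]
        exact ih _ (modify_nonneg removed c hnn) (by rw [hscr, hlene]; omega)
      · -- element absent: no removal on either side
        have hcnt : ¬ fOf removed c < lista.count c := by
          rw [bCount_getD] at hrem; simp only [fOf]; have := hnn c; omega
        have hmem : c ∉ scrub lista (fOf removed) := fun hm => hcnt ((mem_scrub lista (fOf removed) c).mp hm)
        have hrt : removeTry (scrub lista (fOf removed)) c = scrub lista (fOf removed) := by
          simp [removeTry, (PySem.List.remove?_eq_none_iff _ _).mpr hmem]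
        simp only [hrem, if_false]
        rw [hrt]
        exact ih removed hnn hlen

lemma fOf_empty : ∀ v, fOf (PySem.Dict.empty : PySem.Dict Int Int) v = 0 := by
  intro v; simp [fOf, PySem.Dict.getD_empty]

lemma bRemove_nonneg (count : PySem.Dict Int Int) : ∀ (conf : List Int) (removed : PySem.Dict Int Int) (remaining : Int),
    (∀ v, 0 ≤ removed.getD v 0) → ∀ v, 0 ≤ (bRemove count conf removed remaining).getD v 0 := by
  intro conf
  induction conf with
  | nil => intro removed remaining h; exact h
  | cons c rest ih =>
    intro removed remaining h
    rw [bRemove]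
    by_cases h1 : remaining = 1
    · simp [h1, h]
    · simp only [h1, if_false]
      by_cases h2 : removed.getD c 0 < count.getD c 0
      · simp only [h2, if_true]; exact ih _ _ (modify_nonneg removed c h)
      · simp only [h2, if_false]; exact ih _ _ h

lemma pyGet?_zero_getD_eq_headD (l : List Int) : (PySem.List.pyGet? l 0).getD 0 = l.headD 0 := by
  cases l with
  | nil => simp [PySem.List.pyGet?, PySem.List.pyIdx?]
  | cons a t => simp [PySem.List.pyGet?, PySem.List.pyIdx?]

-- ===== VERDICT (by name: the statement is the Claim_ definition above) =====
theorem verificadistante_spec : Claim_equal_verificadistante := by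
  intro lista listaConfere _ hpre
  unfold Spec_verificadistante verificadistante verificadistante_alt
  have hempty : ∀ v, 0 ≤ (PySem.Dict.empty : PySem.Dict Int Int).getD v 0 := by
    intro v; simp [PySem.Dict.getD_empty]
  have hscr0 : scrub lista (fOf PySem.Dict.empty) = lista := by
    rw [scrub_congr lista _ _ fOf_empty, scrub_zero]
  have hlen : 1 ≤ (scrub lista (fOf PySem.Dict.empty)).length := by
    rw [hscr0]; cases lista with
    | nil => exact absurd rfl hpre
    | cons a t => simp
  have hsim := sim lista listaConfere PySem.Dict.empty hempty hlen
  rw [hscr0] at hsim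
  set F := bRemove (bCount lista) listaConfere PySem.Dict.empty (lista.length : Int) with hF
  have hA : verificaLoop listaConfere lista 0 = scrub lista (fOf F) := by
    rw [verificaLoop_eq_modelA listaConfere lista 0 (by omega)]
    simpa using hsim
  have hFnn : ∀ v, 0 ≤ F.getD v 0 :=
    bRemove_nonneg (bCount lista) listaConfere PySem.Dict.empty (lista.length : Int) hempty
  have hB : bScan F lista PySem.Dict.empty = (scrub lista (fOf F)).headD 0 := by
    rw [bScan_eq_scanF F hFnn lista PySem.Dict.empty hempty, scanF_eq_head]
    have hz : (fun x => fOf F x - fOf (PySem.Dict.empty : PySem.Dict Int Int) x) = fOf F := by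
      funext x; rw [fOf_empty]; omega
    rw [hz]
  rw [hA, hB, pyGet?_zero_getD_eq_headD]
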